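-- pv_equiv track=rewrite | github.com/minaldo15/algorithm | 프로그래머스/lv0/120956. 옹알이 （1）/옹알이 （1）.py | solution
-- ===== SOURCE A (Python) =====
-- def solution(babbling):
--     answer = 0
--     lst = ["aya", "ye", "woo", "ma"]
--     for b in babbling:
--         for word in lst:
--             if word == b:
--                 answer += 1
--         for i in range(4):
--             for j in range(4):
--                 if lst[i] + lst[j] == b:
--                     answer += 1
--         for i in range(4):
--             for j in range(4):
--                 for k in range(4):
--                     if lst[i] + lst[j] + lst[k] == b:
--                         answer += 1
--         for i in range(4):
--             for j in range(4):
--                 for k in range(4):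
--                     for l in range(4):
--                         if lst[i] + lst[j] + lst[k] + lst[l] == b:
--                             answer += 1
--     return answer
-- ===== SOURCE B (Python) =====
-- def _parse(s):
--     # Greedily strip base words from the front (first letters are distinct,
--     # so the decomposition is unique); return the word count, or None if stuck.
--     pos, cnt, n = 0, 0, len(s)
--     while pos < n:
--         if s.startswith("aya", pos):
--             pos += 3
--         elif s.startswith("ye", pos):
--             pos += 2
--         elif s.startswith("woo", pos):
--             pos += 3
--         elif s.startswith("ma", pos):
--             pos += 2
--         else:
--             return None
--         cnt += 1
--     return cnt
--
--
-- def solution(babbling):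
--     answer = 0
--     for b in babbling:
--         cnt = _parse(b)
--         if cnt is not None and 1 <= cnt <= 4:
--             answer += 1
--     return answer
-- ===== Notes on version B (the rewrite author's own statement) =====
-- stated objective: faster
-- what changed: Instead of testing each string against all 4+16+64+256 concatenations of the base words, B tokenizes each string in one left-to-right pass (greedily stripping whole base-word prefixes, which is unambiguous since the words' first letters are distinct) and accepts it when the parse consumes the whole string with a word count between 1 and 4.
import Mathlib
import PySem

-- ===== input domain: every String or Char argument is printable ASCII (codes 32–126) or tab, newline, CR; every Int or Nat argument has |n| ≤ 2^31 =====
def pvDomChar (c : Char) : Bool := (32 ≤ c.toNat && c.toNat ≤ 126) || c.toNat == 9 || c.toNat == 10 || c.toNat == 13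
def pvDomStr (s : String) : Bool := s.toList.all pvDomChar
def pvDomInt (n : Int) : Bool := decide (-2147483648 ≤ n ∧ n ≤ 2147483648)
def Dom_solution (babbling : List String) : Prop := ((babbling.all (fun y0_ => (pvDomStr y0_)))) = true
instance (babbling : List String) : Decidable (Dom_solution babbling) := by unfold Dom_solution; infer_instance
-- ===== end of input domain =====

-- B replaces A's comparison of each string against all 340 concatenations of the
-- base words by a single left-to-right tokenizing pass per string (objective: faster).

-- ===== PORT A =====
-- Python strings are modelled as List Char; ``solnLst`` is A's word list ``lst``.
def solnLst : List (List Char) := [['a','y','a'], ['y','e'], ['w','o','o'], ['m','a']]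

-- the body of A's ``for b in babbling`` loop (four counting passes, as in A)
def solnBodyA (answer : Int) (b0 : String) : Int :=
  let b := b0.toList
  let a1 := solnLst.foldl (fun a word => if word = b then a + 1 else a) answer
  let a2 := (PySem.List.pyRange 0 4 1).foldl (fun a i =>
      (PySem.List.pyRange 0 4 1).foldl (fun a j =>
        if PySem.List.pyGetD solnLst i [] ++ PySem.List.pyGetD solnLst j [] = b then a + 1 else a) a) a1
  let a3 := (PySem.List.pyRange 0 4 1).foldl (fun a i =>
      (PySem.List.pyRange 0 4 1).foldl (fun a j =>
        (PySem.List.pyRange 0 4 1).foldl (fun a k =>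
          if PySem.List.pyGetD solnLst i [] ++ PySem.List.pyGetD solnLst j [] ++ PySem.List.pyGetD solnLst k [] = b then a + 1 else a) a) a) a2
  let a4 := (PySem.List.pyRange 0 4 1).foldl (fun a i =>
      (PySem.List.pyRange 0 4 1).foldl (fun a j =>
        (PySem.List.pyRange 0 4 1).foldl (fun a k =>
          (PySem.List.pyRange 0 4 1).foldl (fun a l =>
            if PySem.List.pyGetD solnLst i [] ++ PySem.List.pyGetD solnLst j [] ++ PySem.List.pyGetD solnLst k [] ++ PySem.List.pyGetD solnLst l [] = b then a + 1 else a) a) a) a) a3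
  a4

def solution (babbling : List String) : Int := babbling.foldl solnBodyA 0

-- ===== PORT B =====
-- B's ``while`` loop in ``_parse``: strip one base word per step (the four
-- ``startswith`` tests, in Source B's order); ``none`` is Source B's ``None``.
def parseAlt : List Char → Nat → Option Nat
  | [], cnt => some cnt
  | 'a' :: 'y' :: 'a' :: rest, cnt => parseAlt rest (cnt + 1)
  | 'y' :: 'e' :: rest, cnt => parseAlt rest (cnt + 1)
  | 'w' :: 'o' :: 'o' :: rest, cnt => parseAlt rest (cnt + 1)
  | 'm' :: 'a' :: rest, cnt => parseAlt rest (cnt + 1)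
  | _, _ => none

-- the body of B's ``for b in babbling`` loop
def solnBodyB (answer : Int) (b : String) : Int :=
  match parseAlt b.toList 0 with
  | some cnt => if 1 ≤ cnt ∧ cnt ≤ 4 then answer + 1 else answer
  | none => answer

def solution_alt (babbling : List String) : Int := babbling.foldl solnBodyB 0

-- ===== PRECONDITION & SPEC =====
def Spec_solution (babbling : List String) (out : Int) : Prop := out = solution_alt babbling
instance (babbling : List String) (out : Int) : Decidable (Spec_solution babbling out) := by unfold Spec_solution; infer_instance

-- ===== CLAIM (what is proved, stated in full; the proofs are below) =====
def Claim_equal_solution : Prop := ∀ (babbling : List String), Dom_solution babbling → Spec_solution babbling (solution babbling)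

-- ===== LEMMAS AND PROOFS =====

-- `cands n` = the concatenations of n base words, in A's (index-lexicographic) order
def cands : Nat → List (List Char)
  | 0 => [[]]
  | n + 1 => solnLst.flatMap (fun u => (cands n).map (fun x => u ++ x))

-- the number of n-word concatenations equal to b
def candCnt (n : Nat) (b : List Char) : Nat :=
  (cands n).countP (fun x => decide (x = b))

-- the base words have pairwise distinct first letters, so a word is determined
-- by any extension of it
theorem words_head_det : ∀ u ∈ solnLst, ∀ v ∈ solnLst, ∀ x y : List Char,
    u ++ x = v ++ y → u = v := by
  intro u hu v hv x y h
  simp only [solnLst, List.mem_cons, List.not_mem_nil, or_false] at hu hv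
  rcases hu with rfl | rfl | rfl | rfl <;> rcases hv with rfl | rfl | rfl | rfl <;> simp_all

theorem cands_nodup : ∀ n, (cands n).Nodup := by
  intro n
  induction n with
  | zero => simp [cands]
  | succ n ih =>
    rw [cands, List.nodup_flatMap]
    refine ⟨fun u _ => ih.map (fun x y h => List.append_cancel_left h), ?_⟩
    have hw : solnLst.Nodup := by decide
    refine hw.pairwise_of_forall_ne fun u hu v hv huv s hs ht => ?_
    obtain ⟨x, _, rfl⟩ := List.mem_map.mp hs
    obtain ⟨y, _, huy⟩ := List.mem_map.mp ht
    exact huv (words_head_det u hu v hv x y huy.symm)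

theorem parseAlt_word (u : List Char) (hu : u ∈ solnLst) (t : List Char) (cnt : Nat) :
    parseAlt (u ++ t) cnt = parseAlt t (cnt + 1) := by
  simp only [solnLst, List.mem_cons, List.not_mem_nil, or_false] at hu
  rcases hu with rfl | rfl | rfl | rfl <;> rfl

theorem parseAlt_cands {n : Nat} {b : List Char} (hb : b ∈ cands n) (cnt : Nat) :
    parseAlt b cnt = some (cnt + n) := by
  induction n generalizing b cnt with
  | zero => simp [cands] at hb; subst hb; rfl
  | succ n ih =>
    simp only [cands, List.mem_flatMap, List.mem_map] at hb
    obtain ⟨u, hu, x, hx, rfl⟩ := hb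
    rw [parseAlt_word u hu, ih hx]
    congr 1; omega

theorem parseAlt_sound : ∀ (s : List Char) (cnt c : Nat), parseAlt s cnt = some c →
    ∃ n, c = cnt + n ∧ s ∈ cands n := by
  intro s cnt c h
  fun_induction parseAlt s cnt with
  | case1 cnt => exact ⟨0, by simp_all [cands]⟩
  | case2 rest cnt ih =>
      obtain ⟨n, hn, hm⟩ := ih h
      exact ⟨n + 1, by omega, by
        simp only [cands, List.mem_flatMap, List.mem_map]
        exact ⟨['a','y','a'], by simp [solnLst], rest, hm, rfl⟩⟩
  | case3 rest cnt ih =>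
      obtain ⟨n, hn, hm⟩ := ih h
      exact ⟨n + 1, by omega, by
        simp only [cands, List.mem_flatMap, List.mem_map]
        exact ⟨['y','e'], by simp [solnLst], rest, hm, rfl⟩⟩
  | case4 rest cnt ih =>
      obtain ⟨n, hn, hm⟩ := ih h
      exact ⟨n + 1, by omega, by
        simp only [cands, List.mem_flatMap, List.mem_map]
        exact ⟨['w','o','o'], by simp [solnLst], rest, hm, rfl⟩⟩
  | case5 rest cnt ih =>
      obtain ⟨n, hn, hm⟩ := ih h
      exact ⟨n + 1, by omega, by
        simp only [cands, List.mem_flatMap, List.mem_map]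
        exact ⟨['m','a'], by simp [solnLst], rest, hm, rfl⟩⟩
  | case6 => simp_all

-- the central counting fact: b occurs in `cands n` exactly once if the parse
-- of b yields n words, and not at all otherwise
theorem candCnt_eq (n : Nat) (b : List Char) :
    candCnt n b = if parseAlt b 0 = some n then 1 else 0 := by
  unfold candCnt
  have hcp : (cands n).countP (fun x => decide (x = b)) = (cands n).count b := by
    rw [List.count_eq_countP]
    exact List.countP_congr fun x _ => by simp
  rw [hcp]
  by_cases h : parseAlt b 0 = some n
  · rw [if_pos h]
    obtain ⟨m, hm, hmem⟩ := parseAlt_sound b 0 n h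
    have hmn : n = m := by omega
    rw [hmn]
    exact List.count_eq_one_of_mem (cands_nodup m) hmem
  · rw [if_neg h]
    refine List.count_eq_zero_of_not_mem fun hb => h ?_
    simpa using parseAlt_cands hb 0

-- peeling one word off the front of every candidate
theorem candCnt_peel (n : Nat) (pre b : List Char) :
    (cands (n + 1)).countP (fun x => decide (pre ++ x = b)) =
      (solnLst.map (fun u => (cands n).countP (fun x => decide (pre ++ u ++ x = b)))).sum := by
  rw [cands, List.countP_flatMap]
  refine congrArg List.sum (List.map_congr_left fun u _ => ?_)
  simp only [Function.comp, List.countP_map]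
  exact List.countP_congr fun x _ => by simp [List.append_assoc]

theorem cands_one : cands 1 = solnLst := by decide

-- word-level forms of A's four counting passes
theorem stage1_eq (b : List Char) :
    List.countP (fun x => decide (x = b)) solnLst = candCnt 1 b := by
  unfold candCnt; rw [cands_one]

theorem stage2_eq (b : List Char) :
    (List.map (fun u => List.countP (fun v => decide (u ++ v = b)) solnLst) solnLst).sum
      = candCnt 2 b := by
  unfold candCnt
  have h0 : (cands 2).countP (fun x => decide (x = b))
      = (cands 2).countP (fun x => decide ([] ++ x = b)) :=
    List.countP_congr fun x _ => by simp
  rw [h0, candCnt_peel 1 [] b]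
  refine congrArg List.sum (List.map_congr_left fun u _ => ?_).symm
  rw [cands_one]
  exact List.countP_congr fun v _ => by simp

theorem stage3_eq (b : List Char) :
    (List.map (fun u => (List.map (fun v =>
        List.countP (fun w => decide (u ++ v ++ w = b)) solnLst) solnLst).sum) solnLst).sum
      = candCnt 3 b := by
  unfold candCnt
  have h0 : (cands 3).countP (fun x => decide (x = b))
      = (cands 3).countP (fun x => decide ([] ++ x = b)) :=
    List.countP_congr fun x _ => by simp
  rw [h0, candCnt_peel 2 [] b]
  refine congrArg List.sum (List.map_congr_left fun u _ => ?_).symm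
  rw [candCnt_peel 1 ([] ++ u) b]
  refine congrArg List.sum (List.map_congr_left fun v _ => ?_)
  rw [cands_one]
  exact List.countP_congr fun w _ => by simp [List.append_assoc]

theorem stage4_eq (b : List Char) :
    (List.map (fun u => (List.map (fun v => (List.map (fun w =>
        List.countP (fun x => decide (u ++ v ++ w ++ x = b)) solnLst) solnLst).sum)
        solnLst).sum) solnLst).sum
      = candCnt 4 b := by
  unfold candCnt
  have h0 : (cands 4).countP (fun x => decide (x = b))
      = (cands 4).countP (fun x => decide ([] ++ x = b)) :=
    List.countP_congr fun x _ => by simp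
  rw [h0, candCnt_peel 3 [] b]
  refine congrArg List.sum (List.map_congr_left fun u _ => ?_).symm
  rw [candCnt_peel 2 ([] ++ u) b]
  refine congrArg List.sum (List.map_congr_left fun v _ => ?_)
  rw [candCnt_peel 1 ([] ++ u ++ v) b]
  refine congrArg List.sum (List.map_congr_left fun w _ => ?_)
  rw [cands_one]
  exact List.countP_congr fun x _ => by simp [List.append_assoc]

-- the same, read off A's index loops over range(4) (definitionally equal)
theorem stage2_idx (b : List Char) :
    (List.map (fun i => List.countP (fun j =>
        decide (PySem.List.pyGetD solnLst i [] ++ PySem.List.pyGetD solnLst j [] = b))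
        ([0, 1, 2, 3] : List Int)) ([0, 1, 2, 3] : List Int)).sum = candCnt 2 b :=
  stage2_eq b

theorem stage3_idx (b : List Char) :
    (List.map (fun i => (List.map (fun j => List.countP (fun k =>
        decide (PySem.List.pyGetD solnLst i [] ++ PySem.List.pyGetD solnLst j [] ++ PySem.List.pyGetD solnLst k [] = b))
        ([0, 1, 2, 3] : List Int)) ([0, 1, 2, 3] : List Int)).sum) ([0, 1, 2, 3] : List Int)).sum = candCnt 3 b :=
  stage3_eq b

theorem stage4_idx (b : List Char) :
    (List.map (fun i => (List.map (fun j => (List.map (fun k => List.countP (fun l =>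
        decide (PySem.List.pyGetD solnLst i [] ++ PySem.List.pyGetD solnLst j [] ++ PySem.List.pyGetD solnLst k [] ++ PySem.List.pyGetD solnLst l [] = b))
        ([0, 1, 2, 3] : List Int)) ([0, 1, 2, 3] : List Int)).sum) ([0, 1, 2, 3] : List Int)).sum) ([0, 1, 2, 3] : List Int)).sum = candCnt 4 b :=
  stage4_eq b

theorem sum_map_natCast {α : Type} (l : List α) (c : α → Nat) :
    (l.map (fun x => ((c x : Nat) : Int))).sum = ((l.map c).sum : Int) := by
  rw [Nat.cast_list_sum, List.map_map]; rfl

-- A's loop body as the four candidate counts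
theorem bodyA_eq (a : Int) (b0 : String) :
    solnBodyA a b0 = a + (candCnt 1 b0.toList : Int) + (candCnt 2 b0.toList : Int)
      + (candCnt 3 b0.toList : Int) + (candCnt 4 b0.toList : Int) := by
  simp only [solnBodyA]
  simp only [PySem.List.foldl_ite_add_one, PySem.List.foldl_add]
  have hr : PySem.List.pyRange 0 4 1 = [0, 1, 2, 3] := by decide
  simp only [hr, sum_map_natCast]
  rw [stage1_eq, stage2_idx, stage3_idx, stage4_idx]

-- the loop bodies agree
theorem body_eq (a : Int) (b0 : String) : solnBodyA a b0 = solnBodyB a b0 := by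
  rw [bodyA_eq]
  unfold solnBodyB
  rcases hp : parseAlt b0.toList 0 with _ | c
  · rw [candCnt_eq, candCnt_eq, candCnt_eq, candCnt_eq]
    simp [hp]
  · rw [candCnt_eq, candCnt_eq, candCnt_eq, candCnt_eq, hp]
    have h1 : ∀ n : Nat, (some c = some n) = (c = n) := fun n => by simp
    simp only [h1]
    by_cases h : 1 ≤ c ∧ c ≤ 4
    · rw [if_pos h]
      rcases h with ⟨h1, h4⟩
      interval_cases c <;> norm_num
    · rw [if_neg h]
      have : c = 0 ∨ c ≥ 5 := by omega
      rcases this with rfl | h5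
      · norm_num
      · rw [if_neg (by omega), if_neg (by omega), if_neg (by omega), if_neg (by omega)]
        ring

-- ===== VERDICT (by name: the statement is the Claim_ definition above) =====
theorem solution_spec : Claim_equal_solution := by
  intro babbling _
  unfold Spec_solution solution solution_alt
  rw [funext fun a => funext fun b => body_eq a b]
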